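-- pv_equiv track=rewrite | github.com/sty8470/road_model_makers_proj | src/lib/hyundai_autoever/hdmap_importer.py | localization_to_data
-- ===== SOURCE A (Python) =====
-- def localization_to_data(files, origin):
--
--     road_sign = []
--     traffic_sign = []
--     road_mark = []
--     road_edge = []
--
--     for file_id in files:
--         localizations = files[file_id]['features']
--         for feature in localizations:
--             # 'ROAD_NODE', 'ROAD_LINK', 'LANE_SIDE', 'LANE_LINK'
--             idx = feature['properties']['ID']
--
--             split_val = idx.split('.')[0]
--             if split_val == 'ROAD_SIGN':
--                 road_sign.append(feature)
--             elif split_val == 'TRAFFIC_SIGN':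
--                 traffic_sign.append(feature)
--             elif split_val == 'ROAD_MARK':
--                 road_mark.append(feature)
--             elif split_val == 'ROAD_EDGE':
--                 road_edge.append(feature)
--
--     return road_sign, traffic_sign, road_mark, road_edge
-- ===== SOURCE B (Python) =====
-- def localization_to_data(files, origin):
--     feats = [f for fd in files.values() for f in fd['features']]
--
--     def bucket(prefix):
--         return [f for f in feats if f['properties']['ID'].split('.')[0] == prefix]
--
--     return (bucket('ROAD_SIGN'), bucket('TRAFFIC_SIGN'),
--             bucket('ROAD_MARK'), bucket('ROAD_EDGE'))
-- ===== Notes on version B (the rewrite author's own statement) =====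
-- stated objective: alternative
-- what changed: A partitions in one pass with four mutable accumulators and an if/elif chain; B first flattens all features into one list and then builds each of the four buckets by an independent filter pass over that list.
import Mathlib
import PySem

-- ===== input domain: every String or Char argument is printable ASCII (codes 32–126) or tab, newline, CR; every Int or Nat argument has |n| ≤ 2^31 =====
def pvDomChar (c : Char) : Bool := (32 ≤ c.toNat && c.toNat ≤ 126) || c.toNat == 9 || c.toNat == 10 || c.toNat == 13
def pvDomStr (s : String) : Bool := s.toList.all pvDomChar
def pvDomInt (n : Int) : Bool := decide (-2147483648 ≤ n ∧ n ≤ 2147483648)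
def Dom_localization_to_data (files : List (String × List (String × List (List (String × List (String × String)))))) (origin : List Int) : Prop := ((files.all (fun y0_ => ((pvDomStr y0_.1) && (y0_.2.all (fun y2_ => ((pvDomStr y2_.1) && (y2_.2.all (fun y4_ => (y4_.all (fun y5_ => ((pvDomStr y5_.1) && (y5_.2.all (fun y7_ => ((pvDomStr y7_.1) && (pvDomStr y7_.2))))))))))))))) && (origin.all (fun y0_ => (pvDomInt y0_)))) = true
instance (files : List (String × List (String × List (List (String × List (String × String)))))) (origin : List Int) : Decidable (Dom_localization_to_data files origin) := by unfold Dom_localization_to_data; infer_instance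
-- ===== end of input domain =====

-- B replaces A's one-pass if/elif partition with flatten-then-four-filters (alternative decomposition, same cost).


-- a feature: dict str -> (dict str str)
abbrev pvFeat : Type := List (String × List (String × String))

-- ===== PORT A =====
def localization_to_data (files : List (String × List (String × List (List (String × List (String × String)))))) (origin : List Int) : (List (List (String × List (String × String)))) × (List (List (String × List (String × String)))) × (List (List (String × List (String × String)))) × (List (List (String × List (String × String)))) :=
  files.foldl
    (fun acc entry =>
      -- localizations = files[file_id]['features']   (Pre_ guarantees both lookups succeed)
      let localizations : List pvFeat :=
        ((PySem.Dict.mk ((PySem.Dict.mk files).getD entry.1 [])).get? "features").getD []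
      localizations.foldl
        (fun acc f =>
          let idx := ((PySem.Dict.mk (((PySem.Dict.mk f).get? "properties").getD [])).get? "ID").getD ""
          let split_val := (((PySem.Str.split? idx ".").getD [])).headD ""
          if split_val == "ROAD_SIGN" then (acc.1 ++ [f], acc.2.1, acc.2.2.1, acc.2.2.2)
          else if split_val == "TRAFFIC_SIGN" then (acc.1, acc.2.1 ++ [f], acc.2.2.1, acc.2.2.2)
          else if split_val == "ROAD_MARK" then (acc.1, acc.2.1, acc.2.2.1 ++ [f], acc.2.2.2)
          else if split_val == "ROAD_EDGE" then (acc.1, acc.2.1, acc.2.2.1, acc.2.2.2 ++ [f])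
          else acc)
        acc)
    ([], [], [], [])

-- ===== PORT B =====
-- f['properties']['ID'].split('.')[0]  (Pre_ guarantees the lookups succeed; split never returns [])
def pvBucketPrefix (f : pvFeat) : String :=
  (((PySem.Str.split? (((PySem.Dict.mk (((PySem.Dict.mk f).get? "properties").getD [])).get? "ID").getD "") ".").getD [])).headD ""

def localization_to_data_alt (files : List (String × List (String × List (List (String × List (String × String)))))) (origin : List Int) : (List (List (String × List (String × String)))) × (List (List (String × List (String × String)))) × (List (List (String × List (String × String)))) × (List (List (String × List (String × String)))) :=
  let feats : List pvFeat := files.flatMap (fun fd => ((PySem.Dict.mk fd.2).get? "features").getD [])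
  (feats.filter (fun f => pvBucketPrefix f == "ROAD_SIGN"),
   feats.filter (fun f => pvBucketPrefix f == "TRAFFIC_SIGN"),
   feats.filter (fun f => pvBucketPrefix f == "ROAD_MARK"),
   feats.filter (fun f => pvBucketPrefix f == "ROAD_EDGE"))

-- ===== PRECONDITION & SPEC =====
-- Pre_ excludes exactly (a) inputs on which Python A raises KeyError: a file dict without the key
-- 'features', or a feature without 'properties' or without 'ID'; and (b) association lists whose
-- outer file-id keys repeat, which do not represent any Python dict.
def Pre_localization_to_data (files : List (String × List (String × List (List (String × List (String × String)))))) (origin : List Int) : Prop :=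
  (files.map Prod.fst).Nodup ∧
  ∀ e ∈ files, ((PySem.Dict.mk e.2).get? "features").isSome ∧
    ∀ f ∈ ((PySem.Dict.mk e.2).get? "features").getD ([] : List pvFeat),
      ((PySem.Dict.mk f).get? "properties").isSome ∧
      ((PySem.Dict.mk (((PySem.Dict.mk f).get? "properties").getD [])).get? "ID").isSome
instance (files : List (String × List (String × List (List (String × List (String × String)))))) (origin : List Int) : Decidable (Pre_localization_to_data files origin) := by unfold Pre_localization_to_data; infer_instance

def pvWitness_localization_to_data : (List (String × List (String × List (List (String × List (String × String)))))) × List Int :=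
  ([("f1", [("features", [[("properties", [("ID", "ROAD_SIGN.1")])], [("properties", [("ID", "X.2")])]])]),
    ("f2", [("features", [[("properties", [("ID", "ROAD_EDGE.3")])]])])], [0])

def Spec_localization_to_data (files : List (String × List (String × List (List (String × List (String × String)))))) (origin : List Int) (out : (List (List (String × List (String × String)))) × (List (List (String × List (String × String)))) × (List (List (String × List (String × String)))) × (List (List (String × List (String × String))))) : Prop := out = localization_to_data_alt files origin
instance (files : List (String × List (String × List (List (String × List (String × String)))))) (origin : List Int) (out : (List (List (String × List (String × String)))) × (List (List (String × List (String × String)))) × (List (List (String × List (String × String)))) × (List (List (String × List (String × String))))) : Decidable (Spec_localization_to_data files origin out) := by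
  unfold Spec_localization_to_data
  -- infer_instance alone exceeds the default instance-search size on this deeply nested product type
  have iL : DecidableEq (List (List (String × List (String × String)))) := by infer_instance
  exact @instDecidableEqProd _ _ iL (@instDecidableEqProd _ _ iL (@instDecidableEqProd _ _ iL iL)) _ _

-- ===== CLAIM (what is proved, stated in full; the proofs are below) =====
def Claim_equal_localization_to_data : Prop := ∀ (files : List (String × List (String × List (List (String × List (String × String)))))) (origin : List Int), Dom_localization_to_data files origin → Pre_localization_to_data files origin → Spec_localization_to_data files origin (localization_to_data files origin)

-- ===== LEMMAS AND PROOFS =====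

-- the inner loop of A appends to each bucket exactly the features B's filters select
theorem pvFold_step (feats : List pvFeat) (acc : List pvFeat × List pvFeat × List pvFeat × List pvFeat) :
    feats.foldl
      (fun acc f =>
        let idx := ((PySem.Dict.mk (((PySem.Dict.mk f).get? "properties").getD [])).get? "ID").getD ""
        let split_val := (((PySem.Str.split? idx ".").getD [])).headD ""
        if split_val == "ROAD_SIGN" then (acc.1 ++ [f], acc.2.1, acc.2.2.1, acc.2.2.2)
        else if split_val == "TRAFFIC_SIGN" then (acc.1, acc.2.1 ++ [f], acc.2.2.1, acc.2.2.2)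
        else if split_val == "ROAD_MARK" then (acc.1, acc.2.1, acc.2.2.1 ++ [f], acc.2.2.2)
        else if split_val == "ROAD_EDGE" then (acc.1, acc.2.1, acc.2.2.1, acc.2.2.2 ++ [f])
        else acc)
      acc
    = (acc.1 ++ feats.filter (fun f => pvBucketPrefix f == "ROAD_SIGN"),
       acc.2.1 ++ feats.filter (fun f => pvBucketPrefix f == "TRAFFIC_SIGN"),
       acc.2.2.1 ++ feats.filter (fun f => pvBucketPrefix f == "ROAD_MARK"),
       acc.2.2.2 ++ feats.filter (fun f => pvBucketPrefix f == "ROAD_EDGE")) := by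
  induction feats generalizing acc with
  | nil => simp
  | cons f rest ih =>
    have hpre : ((((PySem.Str.split? (((PySem.Dict.mk (((PySem.Dict.mk f).get? "properties").getD [])).get? "ID").getD "") ".").getD [])).headD "") = pvBucketPrefix f := rfl
    rw [List.foldl_cons, ih]
    by_cases h1 : pvBucketPrefix f = "ROAD_SIGN"
    · simp only [hpre]
      simp [h1]
    · by_cases h2 : pvBucketPrefix f = "TRAFFIC_SIGN"
      · simp only [hpre]
        simp [h1, h2]
      · by_cases h3 : pvBucketPrefix f = "ROAD_MARK"
        · simp only [hpre]
          simp [h1, h2, h3]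
        · by_cases h4 : pvBucketPrefix f = "ROAD_EDGE"
          · simp only [hpre]
            simp [h1, h2, h3, h4]
          · simp only [hpre]
            simp [h1, h2, h3, h4]

theorem localization_to_data_spec : Claim_equal_localization_to_data := by
  intro files origin _ hpre
  obtain ⟨hnd, _⟩ := hpre
  unfold Spec_localization_to_data localization_to_data localization_to_data_alt
  -- replace the lookup files[file_id] by the entry's own value (keys are Nodup)
  have hlook : ∀ e ∈ files, (PySem.Dict.mk files).getD e.1 ([] : List (String × List pvFeat)) = e.2 := by
    intro e he
    have : (PySem.Dict.mk files).get? e.1 = some e.2 := by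
      apply PySem.Dict.get?_of_mem_items
      · simpa using he
      · simpa [PySem.Dict.keys] using hnd
    simp [PySem.Dict.getD_eq_get?_getD, this]
  rw [PySem.List.foldl_congr_mem _ _ (g :=
    (fun acc (entry : String × List (String × List pvFeat)) =>
      (((PySem.Dict.mk entry.2).get? "features").getD ([] : List pvFeat)).foldl
        (fun acc f =>
          let idx := ((PySem.Dict.mk (((PySem.Dict.mk f).get? "properties").getD [])).get? "ID").getD ""
          let split_val := (((PySem.Str.split? idx ".").getD [])).headD ""
          if split_val == "ROAD_SIGN" then (acc.1 ++ [f], acc.2.1, acc.2.2.1, acc.2.2.2)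
          else if split_val == "TRAFFIC_SIGN" then (acc.1, acc.2.1 ++ [f], acc.2.2.1, acc.2.2.2)
          else if split_val == "ROAD_MARK" then (acc.1, acc.2.1, acc.2.2.1 ++ [f], acc.2.2.2)
          else if split_val == "ROAD_EDGE" then (acc.1, acc.2.1, acc.2.2.1, acc.2.2.2 ++ [f])
          else acc)
        acc))]
  · rw [← List.foldl_flatMap, pvFold_step]
    simp
  · intro acc e he
    rw [hlook e he]
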